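-- pv_equiv track=rewrite | github.com/avaughn271/AdmixtureBayes | admixturebayes/generate_prior_trees.py | _allowed_generation
-- ===== SOURCE A (Python) =====
-- def _allowed_generation(chosen_indexes, no_totally_free, no_halfly_frees, no_admixes, illegal_indexes):
--
--     #checking if there are double bands
--     for i1,i2 in illegal_indexes:
--         c1,c2=chosen_indexes[i1], chosen_indexes[i2]
--         if c2==c1+1 and c1%2==0 and c2<no_totally_free:
--             return False
--         if c1==c2+1 and c2%2==0 and c1<no_totally_free:
--             return False
--
--     no_doubles=0
--     tmp=sorted([c for c in chosen_indexes if c<no_totally_free])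
--     if len(tmp)>=2:
--         for c1,c2 in zip(tmp[:-1],tmp[1:]):
--             if (c2==c1+1 and c1%2==0):
--                 no_doubles+=1
--     no_admixtures=sum(chosen_index>=no_totally_free+no_halfly_frees for chosen_index in chosen_indexes)
--     no_singles=sum(chosen_index>=no_totally_free for chosen_index in chosen_indexes)-no_admixtures
--     if no_admixtures+no_singles+no_doubles==0:
--         return False
--     if no_admixes==1 and no_admixtures==0 and ((no_halfly_frees==0 and no_totally_free==4 and no_doubles==1) or
--                                                (no_halfly_frees==1 and no_totally_free==2 and no_singles==1)):
--         return False
--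
--     return True
-- ===== SOURCE B (Python) =====
-- def _allowed_generation(chosen_indexes, no_totally_free, no_halfly_frees, no_admixes, illegal_indexes):
--     # single symmetric test per illegal pair, short-circuited by any()
--     if any(abs(chosen_indexes[i1] - chosen_indexes[i2]) == 1
--            and min(chosen_indexes[i1], chosen_indexes[i2]) % 2 == 0
--            and max(chosen_indexes[i1], chosen_indexes[i2]) < no_totally_free
--            for i1, i2 in illegal_indexes):
--         return False
--     # doubles via set membership (no sort); both count passes fused into one loop
--     free = set(c for c in chosen_indexes if c < no_totally_free)
--     no_doubles = sum(1 for c in free if c % 2 == 0 and c + 1 in free)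
--     no_admixtures = 0
--     at_least_single = 0
--     for c in chosen_indexes:
--         if c >= no_totally_free + no_halfly_frees:
--             no_admixtures += 1
--         if c >= no_totally_free:
--             at_least_single += 1
--     no_singles = at_least_single - no_admixtures
--     # one boolean expression instead of an early-return chain
--     return not (no_admixtures + no_singles + no_doubles == 0
--                 or (no_admixes == 1 and no_admixtures == 0
--                     and ((no_halfly_frees == 0 and no_totally_free == 4 and no_doubles == 1)
--                          or (no_halfly_frees == 1 and no_totally_free == 2 and no_singles == 1))))
-- ===== Notes on version B (the rewrite author's own statement) =====
-- stated objective: alternative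
-- what changed: no_doubles is computed by set membership (even c with c+1 in the set of free indexes) instead of sorting and scanning adjacent pairs; the two mirrored illegal-pair tests become one symmetric abs/min/max test inside any(); the admixture and single counts are fused into one loop; the early-return chain becomes a single boolean expression.
import Mathlib
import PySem

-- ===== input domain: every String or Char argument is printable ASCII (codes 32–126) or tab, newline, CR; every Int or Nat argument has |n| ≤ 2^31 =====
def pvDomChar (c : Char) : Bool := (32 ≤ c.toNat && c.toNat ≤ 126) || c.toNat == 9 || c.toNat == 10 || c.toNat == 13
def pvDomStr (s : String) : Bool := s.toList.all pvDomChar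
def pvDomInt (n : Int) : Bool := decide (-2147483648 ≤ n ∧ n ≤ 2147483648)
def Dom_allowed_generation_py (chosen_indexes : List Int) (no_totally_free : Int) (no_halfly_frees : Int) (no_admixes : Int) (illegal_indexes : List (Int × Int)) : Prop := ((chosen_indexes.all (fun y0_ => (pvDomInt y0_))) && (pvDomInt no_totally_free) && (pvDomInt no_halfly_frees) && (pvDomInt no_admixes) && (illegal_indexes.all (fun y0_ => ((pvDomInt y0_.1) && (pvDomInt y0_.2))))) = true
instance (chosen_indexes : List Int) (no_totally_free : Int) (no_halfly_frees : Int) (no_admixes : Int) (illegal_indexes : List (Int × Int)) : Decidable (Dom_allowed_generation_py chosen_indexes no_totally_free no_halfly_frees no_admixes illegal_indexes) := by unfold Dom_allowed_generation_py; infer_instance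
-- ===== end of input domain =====

-- B replaces A's sort + adjacent-pair scan for no_doubles by a set-membership count,
-- A's mirrored pair tests by one symmetric abs/min/max test inside any(), fuses the two
-- count passes into one loop, and turns the early-return chain into one boolean expression.

-- ===== PORT A =====
-- the code of A after the illegal-pair loop ends without returning
def pvA_rest (ci : List Int) (N H adm : Int) : Bool :=
  let tmp := PySem.List.sorted (ci.filter (fun c => decide (c < N))) (fun x => x) false
  let no_doubles : Int :=
    if tmp.length ≥ 2 then
      (tmp.dropLast.zip tmp.tail).foldl
        (fun acc p => if p.2 = p.1 + 1 ∧ p.1 % 2 = 0 then acc + 1 else acc) 0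
    else 0
  let no_admixtures : Int := ci.foldl (fun a c => a + (if c ≥ N + H then 1 else 0)) 0
  let no_singles : Int := ci.foldl (fun a c => a + (if c ≥ N then 1 else 0)) 0 - no_admixtures
  if no_admixtures + no_singles + no_doubles = 0 then false
  else if adm = 1 ∧ no_admixtures = 0 ∧
          ((H = 0 ∧ N = 4 ∧ no_doubles = 1) ∨ (H = 1 ∧ N = 2 ∧ no_singles = 1)) then false
  else true

-- the 'for i1,i2 in illegal_indexes' loop with its two early returns
def pvA_loop (ci : List Int) (N H adm : Int) : List (Int × Int) → Bool
  | [] => pvA_rest ci N H adm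
  | (i1, i2) :: rest =>
    match PySem.List.pyGet? ci i1, PySem.List.pyGet? ci i2 with
    | some c1, some c2 =>
      if c2 = c1 + 1 ∧ c1 % 2 = 0 ∧ c2 < N then false
      else if c1 = c2 + 1 ∧ c2 % 2 = 0 ∧ c1 < N then false
      else pvA_loop ci N H adm rest
    | _, _ => false  -- IndexError in Python; excluded by Pre_

def allowed_generation_py (chosen_indexes : List Int) (no_totally_free : Int) (no_halfly_frees : Int) (no_admixes : Int) (illegal_indexes : List (Int × Int)) : Bool :=
  pvA_loop chosen_indexes no_totally_free no_halfly_frees no_admixes illegal_indexes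

-- ===== PORT B =====
-- B's symmetric per-pair predicate inside any()
def pvB_bad (ci : List Int) (N : Int) (p : Int × Int) : Bool :=
  match PySem.List.pyGet? ci p.1, PySem.List.pyGet? ci p.2 with
  | some c1, some c2 => decide (|c1 - c2| = 1 ∧ (min c1 c2) % 2 = 0 ∧ max c1 c2 < N)
  | _, _ => false  -- IndexError in Python; excluded by Pre_

def allowed_generation_py_alt (chosen_indexes : List Int) (no_totally_free : Int) (no_halfly_frees : Int) (no_admixes : Int) (illegal_indexes : List (Int × Int)) : Bool :=
  if illegal_indexes.any (pvB_bad chosen_indexes no_totally_free) then false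
  else
    let free : PySem.Set Int :=
      PySem.Set.ofList (chosen_indexes.filter (fun c => decide (c < no_totally_free)))
    let no_doubles : Int :=
      free.foldl (fun a c => a + (if c % 2 = 0 ∧ PySem.Set.contains free (c + 1) then 1 else 0)) 0
    let counts : Int × Int := chosen_indexes.foldl
      (fun (p : Int × Int) c =>
        ((if c ≥ no_totally_free + no_halfly_frees then p.1 + 1 else p.1),
         (if c ≥ no_totally_free then p.2 + 1 else p.2))) (0, 0)
    let no_admixtures := counts.1
    let no_singles := counts.2 - no_admixtures
    !(decide (no_admixtures + no_singles + no_doubles = 0) ||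
      (decide (no_admixes = 1) && decide (no_admixtures = 0) &&
       (decide (no_halfly_frees = 0 ∧ no_totally_free = 4 ∧ no_doubles = 1) ||
        decide (no_halfly_frees = 1 ∧ no_totally_free = 2 ∧ no_singles = 1))))

-- ===== PRECONDITION & SPEC =====
-- Pre_ excludes exactly the inputs where `chosen_indexes[i1]`/`chosen_indexes[i2]` raises IndexError in A (and in B alike).
def Pre_allowed_generation_py (chosen_indexes : List Int) (no_totally_free : Int) (no_halfly_frees : Int) (no_admixes : Int) (illegal_indexes : List (Int × Int)) : Prop :=
  ∀ p ∈ illegal_indexes, PySem.Raise.InRange chosen_indexes.length p.1 ∧ PySem.Raise.InRange chosen_indexes.length p.2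
instance (chosen_indexes : List Int) (no_totally_free : Int) (no_halfly_frees : Int) (no_admixes : Int) (illegal_indexes : List (Int × Int)) : Decidable (Pre_allowed_generation_py chosen_indexes no_totally_free no_halfly_frees no_admixes illegal_indexes) := by unfold Pre_allowed_generation_py; infer_instance

def pvWitness_allowed_generation_py : List Int × Int × Int × Int × (List (Int × Int)) :=
  ([0, 1, 5], 4, 1, 0, [(0, 2), (-1, 1)])

def Spec_allowed_generation_py (chosen_indexes : List Int) (no_totally_free : Int) (no_halfly_frees : Int) (no_admixes : Int) (illegal_indexes : List (Int × Int)) (out : Bool) : Prop := out = allowed_generation_py_alt chosen_indexes no_totally_free no_halfly_frees no_admixes illegal_indexes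
instance (chosen_indexes : List Int) (no_totally_free : Int) (no_halfly_frees : Int) (no_admixes : Int) (illegal_indexes : List (Int × Int)) (out : Bool) : Decidable (Spec_allowed_generation_py chosen_indexes no_totally_free no_halfly_frees no_admixes illegal_indexes out) := by unfold Spec_allowed_generation_py; infer_instance

-- ===== CLAIM (what is proved, stated in full; the proofs are below) =====
def Claim_equal_allowed_generation_py : Prop := ∀ (chosen_indexes : List Int) (no_totally_free : Int) (no_halfly_frees : Int) (no_admixes : Int) (illegal_indexes : List (Int × Int)), Dom_allowed_generation_py chosen_indexes no_totally_free no_halfly_frees no_admixes illegal_indexes → Pre_allowed_generation_py chosen_indexes no_totally_free no_halfly_frees no_admixes illegal_indexes → Spec_allowed_generation_py chosen_indexes no_totally_free no_halfly_frees no_admixes illegal_indexes (allowed_generation_py chosen_indexes no_totally_free no_halfly_frees no_admixes illegal_indexes)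

-- ===== LEMMAS AND PROOFS =====

-- recursion mirroring A's zip-of-adjacent-pairs fold
def pvPC : List Int → Int → Int
  | [], a => a
  | [_], a => a
  | x :: y :: t, a => pvPC (y :: t) (if y = x + 1 ∧ x % 2 = 0 then a + 1 else a)

theorem pvZipFold_eq_pvPC (l : List Int) (a : Int) :
    (l.dropLast.zip l.tail).foldl
      (fun acc p => if p.2 = p.1 + 1 ∧ p.1 % 2 = 0 then acc + 1 else acc) a = pvPC l a := by
  induction l generalizing a with
  | nil => rfl
  | cons x t ih =>
    cases t with
    | nil => rfl
    | cons y t' =>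
      simp only [List.dropLast_cons₂, List.tail_cons, List.zip_cons_cons, List.foldl_cons]
      exact ih _

-- the even/successor counting measure both programs compute
noncomputable def pvCnt (s : Finset Int) : ℕ :=
  (s.filter (fun c => c % 2 = 0 ∧ (c + 1) ∈ s)).card

theorem pvPC_acc (l : List Int) (a : Int) : pvPC l a = a + pvPC l 0 := by
  induction l generalizing a with
  | nil => simp [pvPC]
  | cons x t ih =>
    cases t with
    | nil => simp [pvPC]
    | cons y t' =>
      show pvPC (y :: t') _ = a + pvPC (y :: t') _
      rw [ih, ih (if y = x + 1 ∧ x % 2 = 0 then 0 + 1 else 0)]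
      split_ifs <;> ring

theorem pvPC_sorted (l : List Int) (hs : List.Pairwise (· ≤ ·) l) :
    pvPC l 0 = pvCnt l.toFinset := by
  induction l with
  | nil => simp [pvPC, pvCnt]
  | cons x t ih =>
    rw [List.pairwise_cons] at hs
    obtain ⟨hx, hst⟩ := hs
    cases t with
    | nil =>
      simp only [pvPC, pvCnt, List.toFinset_cons, List.toFinset_nil]
      rw [Finset.filter_eq_empty_iff.mpr]
      · simp
      · intro c hc
        simp only [insert_empty_eq, Finset.mem_singleton] at hc ⊢
        subst hc
        intro h
        omega
    | cons y t' =>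
      have hyt : ∀ b ∈ (y :: t' : List Int), y ≤ b := by
        intro b hb
        rcases List.mem_cons.mp hb with h | h
        · omega
        · exact (List.pairwise_cons.mp hst).1 b h
      by_cases hxy : x = y
      · have h1 : pvPC (x :: y :: t') 0 = pvPC (y :: t') 0 := by
          show pvPC (y :: t') _ = _
          rw [if_neg (by rintro ⟨h, -⟩; omega)]
        have h2 : (x :: y :: t').toFinset = (y :: t').toFinset := by
          subst hxy; simp
        rw [h1, h2, ih hst]
      · have hlt : x < y := lt_of_le_of_ne (hx y (by simp)) hxy
        have hxt : x ∉ (y :: t' : List Int) := by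
          intro h; have := hyt x h; omega
        have hxf : x ∉ (y :: t').toFinset := by simpa using hxt
        have hcnt : pvCnt (x :: y :: t').toFinset
            = (if y = x + 1 ∧ x % 2 = 0 then 1 else 0) + pvCnt (y :: t').toFinset := by
          unfold pvCnt
          have hins : (x :: y :: t').toFinset = insert x (y :: t').toFinset := by simp
          rw [hins, Finset.filter_insert]
          have hpx : (x % 2 = 0 ∧ (x + 1) ∈ insert x (y :: t').toFinset) ↔ (y = x + 1 ∧ x % 2 = 0) := by
            constructor
            · rintro ⟨he, hm⟩
              rcases Finset.mem_insert.mp hm with h | h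
              · omega
              · have h' : x + 1 ∈ (y :: t' : List Int) := List.mem_toFinset.mp h
                rcases List.mem_cons.mp h' with h'' | h''
                · exact ⟨h''.symm, he⟩
                · have hle := hyt (x + 1) (List.mem_cons_of_mem _ h'')
                  exact ⟨by omega, he⟩
            · rintro ⟨hy, he⟩
              exact ⟨he, Finset.mem_insert.mpr (Or.inr (List.mem_toFinset.mpr (by simp [← hy])))⟩
          have hfilter_eq : Finset.filter (fun c => c % 2 = 0 ∧ (c + 1) ∈ insert x (y :: t').toFinset) (y :: t').toFinset
              = Finset.filter (fun c => c % 2 = 0 ∧ (c + 1) ∈ (y :: t').toFinset) (y :: t').toFinset := by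
            apply Finset.filter_congr
            intro c hc
            have hcy : y ≤ c := hyt c (List.mem_toFinset.mp hc)
            rw [and_congr_right_iff]
            intro _
            rw [Finset.mem_insert]
            constructor
            · rintro (h | h)
              · omega
              · exact h
            · intro h; exact Or.inr h
          by_cases hcond : y = x + 1 ∧ x % 2 = 0
          · rw [if_pos (hpx.mpr hcond)]
            rw [Finset.card_insert_of_notMem (fun h => hxf (Finset.mem_of_mem_filter _ h))]
            rw [hfilter_eq, if_pos hcond]
            omega
          · rw [if_neg (fun h => hcond (hpx.mp h))]
            rw [hfilter_eq, if_neg hcond]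
            omega
        have hpc : pvPC (x :: y :: t') 0 = (if y = x + 1 ∧ x % 2 = 0 then 1 else 0) + pvPC (y :: t') 0 := by
          show pvPC (y :: t') _ = _
          rw [pvPC_acc]
          split_ifs <;> ring
        rw [hpc, hcnt, ih hst]
        push_cast
        ring

-- B's counting foldl is the length of the filtered element list
theorem pvB_fold_count (free : List Int) (d : List Int) (a : Int) :
    d.foldl (fun a c => a + (if c % 2 = 0 ∧ PySem.Set.contains free (c + 1) then 1 else 0)) a
      = a + ((d.filter (fun c => decide (c % 2 = 0) && PySem.Set.contains free (c + 1))).length : Int) := by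
  induction d generalizing a with
  | nil => simp
  | cons c t ih =>
    simp only [List.foldl_cons, List.filter_cons]
    by_cases h1 : c % 2 = 0 <;> by_cases h2 : PySem.Set.contains free (c + 1) = true
    · have hq : (decide (c % 2 = 0) && PySem.Set.contains free (c + 1)) = true := by
        simp only [Bool.and_eq_true, decide_eq_true_eq]; exact ⟨h1, h2⟩
      rw [if_pos ⟨h1, h2⟩, ih, hq]
      simp only [if_true, List.length_cons]
      push_cast; ring
    · have h2' : PySem.Set.contains free (c + 1) = false := by
        cases hc : PySem.Set.contains free (c + 1) with
        | false => rfl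
        | true => exact absurd hc h2
      rw [if_neg (by tauto), ih, h2', Bool.and_false]
      simp only [Bool.false_eq_true, if_false, add_zero]
    · rw [if_neg (by tauto), ih, decide_eq_false h1, Bool.false_and]
      simp only [Bool.false_eq_true, if_false, add_zero]
    · rw [if_neg (by tauto), ih, decide_eq_false h1, Bool.false_and]
      simp only [Bool.false_eq_true, if_false, add_zero]

-- a Bool filter-count over a nodup list is a Finset card
theorem pvNodup_filter_card (d : List Int) (hnd : d.Nodup) (p : Int → Bool) :
    (d.filter p).length = (d.toFinset.filter (fun c => p c = true)).card := by
  rw [← List.toFinset_card_of_nodup (hnd.filter _), List.toFinset_filter]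

-- A's doubles value equals B's doubles value
theorem pvDoubles_eq (ci : List Int) (N : Int) :
    (let tmp := PySem.List.sorted (ci.filter (fun c => decide (c < N))) (fun x => x) false
     if tmp.length ≥ 2 then
       (tmp.dropLast.zip tmp.tail).foldl
         (fun acc p => if p.2 = p.1 + 1 ∧ p.1 % 2 = 0 then acc + 1 else acc) 0
     else (0 : Int))
    = (let free : PySem.Set Int := PySem.Set.ofList (ci.filter (fun c => decide (c < N)))
       free.foldl (fun a c => a + (if c % 2 = 0 ∧ PySem.Set.contains free (c + 1) then 1 else 0)) 0) := by
  set fl := ci.filter (fun c => decide (c < N)) with hfl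
  set tmp := PySem.List.sorted fl (fun x => x) false with htmp
  set free : PySem.Set Int := PySem.Set.ofList fl with hfree
  have hmem_tmp : ∀ x, x ∈ tmp ↔ x ∈ fl := fun x => PySem.List.mem_sorted fl _ _ x
  have hmem_free : ∀ x, x ∈ free ↔ x ∈ fl := fun x => PySem.Set.mem_ofList fl x
  have hsorted : List.Pairwise (· ≤ ·) tmp := PySem.List.sorted_pairwise fl (fun x => x)
  have htf : tmp.toFinset = fl.toFinset := by
    apply Finset.ext; intro x; simp [hmem_tmp x]
  have hff : free.toFinset = fl.toFinset := by
    apply Finset.ext; intro x; simp [hmem_free x]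
  have hB : free.foldl (fun a c => a + (if c % 2 = 0 ∧ PySem.Set.contains free (c + 1) then 1 else 0)) 0
      = (pvCnt fl.toFinset : Int) := by
    rw [pvB_fold_count free free 0, zero_add]
    rw [pvNodup_filter_card free (PySem.Set.nodup_ofList fl)]
    unfold pvCnt
    rw [hff]
    congr 2
    apply Finset.filter_congr
    intro c _
    constructor
    · intro h
      have h' := of_decide_eq_true ((Bool.and_eq_true _ _).mp h).1
      have h'' := ((Bool.and_eq_true _ _).mp h).2
      refine ⟨h', ?_⟩
      rw [List.mem_toFinset, ← hmem_free]
      simpa [PySem.Set.contains] using h''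
    · rintro ⟨h1, h2⟩
      rw [List.mem_toFinset, ← hmem_free] at h2
      simp [h1, PySem.Set.contains]
      simpa [PySem.Set.contains] using h2
  have hA0 : pvPC tmp 0 = (pvCnt fl.toFinset : Int) := by
    rw [pvPC_sorted tmp hsorted, htf]
  by_cases hlen : tmp.length ≥ 2
  · simp only [if_pos hlen]
    rw [pvZipFold_eq_pvPC, hA0, hB]
  · simp only [if_neg hlen]
    rw [hB, ← hA0]
    match htmp2 : tmp with
    | [] => rfl
    | [x] => rfl
    | x :: y :: t =>
      have hge : (x :: y :: t).length ≥ 2 := by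
        rw [List.length_cons, List.length_cons]; omega
      exact absurd hge hlen

-- B's fused count fold equals A's two separate count folds
theorem pvFused_fold (ci : List Int) (N H : Int) (a b : Int) :
    ci.foldl (fun (p : Int × Int) c =>
        ((if c ≥ N + H then p.1 + 1 else p.1), (if c ≥ N then p.2 + 1 else p.2))) (a, b)
      = (ci.foldl (fun a c => a + (if c ≥ N + H then 1 else 0)) a,
         ci.foldl (fun a c => a + (if c ≥ N then 1 else 0)) b) := by
  induction ci generalizing a b with
  | nil => rfl
  | cons c t ih =>
    simp only [List.foldl_cons]
    rw [ih]
    congr 1 <;> split_ifs <;> ring_nf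

-- the early-return chain as one boolean expression, over generalized counts
theorem pvChain_eq (nd na nt adm H N : Int) :
    (if na + (nt - na) + nd = 0 then false
     else if adm = 1 ∧ na = 0 ∧ ((H = 0 ∧ N = 4 ∧ nd = 1) ∨ (H = 1 ∧ N = 2 ∧ nt - na = 1)) then false
     else true)
    = !(decide (na + (nt - na) + nd = 0) ||
        (decide (adm = 1) && decide (na = 0) &&
         (decide (H = 0 ∧ N = 4 ∧ nd = 1) || decide (H = 1 ∧ N = 2 ∧ nt - na = 1)))) := by
  split_ifs with h1 h2 <;> simp_all <;> omega

-- A's rest equals B's else-branch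
theorem pvRest_eq (ci : List Int) (N H adm : Int) :
    pvA_rest ci N H adm =
    (let free : PySem.Set Int := PySem.Set.ofList (ci.filter (fun c => decide (c < N)))
     let no_doubles : Int :=
       free.foldl (fun a c => a + (if c % 2 = 0 ∧ PySem.Set.contains free (c + 1) then 1 else 0)) 0
     let counts : Int × Int := ci.foldl
       (fun (p : Int × Int) c =>
         ((if c ≥ N + H then p.1 + 1 else p.1), (if c ≥ N then p.2 + 1 else p.2))) (0, 0)
     let no_admixtures := counts.1
     let no_singles := counts.2 - no_admixtures
     !(decide (no_admixtures + no_singles + no_doubles = 0) ||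
       (decide (adm = 1) && decide (no_admixtures = 0) &&
        (decide (H = 0 ∧ N = 4 ∧ no_doubles = 1) ||
         decide (H = 1 ∧ N = 2 ∧ no_singles = 1))))) := by
  unfold pvA_rest
  have hd := pvDoubles_eq ci N
  simp only at hd ⊢
  rw [hd, pvFused_fold]
  exact pvChain_eq _ _ _ adm H N

-- A's two mirrored tests are B's symmetric test
theorem pvBad_iff (c1 c2 N : Int) :
    ((c2 = c1 + 1 ∧ c1 % 2 = 0 ∧ c2 < N) ∨ (c1 = c2 + 1 ∧ c2 % 2 = 0 ∧ c1 < N))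
      ↔ (|c1 - c2| = 1 ∧ (min c1 c2) % 2 = 0 ∧ max c1 c2 < N) := by
  rcases le_total c1 c2 with h | h
  · rw [abs_of_nonpos (by omega), min_eq_left h, max_eq_right h]
    omega
  · rw [abs_of_nonneg (by omega), min_eq_right h, max_eq_left h]
    omega

-- the loops agree under Pre_
theorem pvLoop_eq (ci : List Int) (N H adm : Int) (ill : List (Int × Int))
    (hpre : ∀ p ∈ ill, PySem.Raise.InRange ci.length p.1 ∧ PySem.Raise.InRange ci.length p.2) :
    pvA_loop ci N H adm ill = allowed_generation_py_alt ci N H adm ill := by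
  induction ill with
  | nil =>
    unfold allowed_generation_py_alt
    simp only [List.any_nil, if_neg (Bool.false_ne_true)]
    exact pvRest_eq ci N H adm
  | cons p rest ih =>
    obtain ⟨i1, i2⟩ := p
    have h1 := (hpre (i1, i2) (by simp)).1
    have h2 := (hpre (i1, i2) (by simp)).2
    obtain ⟨c1, hc1⟩ : ∃ c1, PySem.List.pyGet? ci i1 = some c1 := by
      cases hg : PySem.List.pyGet? ci i1 with
      | none => exact absurd h1 ((PySem.List.pyGet?_eq_none_iff ci i1).mp hg)
      | some c => exact ⟨c, rfl⟩
    obtain ⟨c2, hc2⟩ : ∃ c2, PySem.List.pyGet? ci i2 = some c2 := by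
      cases hg : PySem.List.pyGet? ci i2 with
      | none => exact absurd h2 ((PySem.List.pyGet?_eq_none_iff ci i2).mp hg)
      | some c => exact ⟨c, rfl⟩
    have ihrest := ih (fun q hq => hpre q (by simp [hq]))
    have hbad : pvB_bad ci N (i1, i2)
        = decide (|c1 - c2| = 1 ∧ (min c1 c2) % 2 = 0 ∧ max c1 c2 < N) := by
      unfold pvB_bad
      rw [hc1, hc2]
    by_cases hB : (c2 = c1 + 1 ∧ c1 % 2 = 0 ∧ c2 < N) ∨ (c1 = c2 + 1 ∧ c2 % 2 = 0 ∧ c1 < N)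
    · have hbt : pvB_bad ci N (i1, i2) = true := by
        rw [hbad, decide_eq_true_eq]
        exact (pvBad_iff c1 c2 N).mp hB
      have hA : pvA_loop ci N H adm ((i1, i2) :: rest) = false := by
        simp only [pvA_loop, hc1, hc2]
        rcases hB with h | h
        · rw [if_pos h]
        · rw [if_neg, if_pos h]
          rintro ⟨ha, hb, hcc⟩
          obtain ⟨ha', hb', hc'⟩ := h
          omega
      rw [hA]
      unfold allowed_generation_py_alt
      rw [List.any_cons, hbt, Bool.true_or, if_pos rfl]
    · have hbf : pvB_bad ci N (i1, i2) = false := by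
        rw [hbad, decide_eq_false_iff_not]
        exact fun h => hB ((pvBad_iff c1 c2 N).mpr h)
      have hA : pvA_loop ci N H adm ((i1, i2) :: rest) = pvA_loop ci N H adm rest := by
        simp only [pvA_loop, hc1, hc2]
        rw [if_neg (fun h => hB (Or.inl h)), if_neg (fun h => hB (Or.inr h))]
      rw [hA, ihrest]
      unfold allowed_generation_py_alt
      rw [List.any_cons, hbf, Bool.false_or]

-- ===== VERDICT (by name: the statement is the Claim_ definition above) =====
theorem allowed_generation_py_spec : Claim_equal_allowed_generation_py := by
  intro ci N H adm ill _ hpre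
  unfold Spec_allowed_generation_py allowed_generation_py
  exact pvLoop_eq ci N H adm ill hpre
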